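-- pv_equiv track=rewrite | github.com/DOKOS-TAYOS/Tensor-Network-Visualization | src/tensor_network_viz/_core/layout_structure_coordinates.py | _coordinate_axis_lengths
-- ===== SOURCE A (Python) =====
-- def _coordinate_axis_lengths(coords_by_node: dict[int, tuple[int, ...]]) -> tuple[int, ...]:
--     if not coords_by_node:
--         return ()
--     dimensions = len(next(iter(coords_by_node.values())))
--     return tuple(
--         len({coords[axis_index] for coords in coords_by_node.values()})
--         for axis_index in range(dimensions)
--     )
-- ===== SOURCE B (Python) =====
-- def _coordinate_axis_lengths(coords_by_node: dict[int, tuple[int, ...]]) -> tuple[int, ...]: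
--     sets = None
--     for coords in coords_by_node.values():
--         if sets is None:
--             sets = [set() for _ in coords]
--         for axis_index in range(len(sets)):
--             sets[axis_index].add(coords[axis_index])
--     if sets is None:
--         return ()
--     return tuple(map(len, sets))
-- ===== Notes on version B (the rewrite author's own statement) =====
-- stated objective: alternative
-- what changed: A rescans all dict values once per axis (one set comprehension per axis index); B makes a single forward pass over the values, lazily creating D accumulator sets from the first tuple and distributing each coordinate into its axis set, then returns their sizes.
import Mathlib
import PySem

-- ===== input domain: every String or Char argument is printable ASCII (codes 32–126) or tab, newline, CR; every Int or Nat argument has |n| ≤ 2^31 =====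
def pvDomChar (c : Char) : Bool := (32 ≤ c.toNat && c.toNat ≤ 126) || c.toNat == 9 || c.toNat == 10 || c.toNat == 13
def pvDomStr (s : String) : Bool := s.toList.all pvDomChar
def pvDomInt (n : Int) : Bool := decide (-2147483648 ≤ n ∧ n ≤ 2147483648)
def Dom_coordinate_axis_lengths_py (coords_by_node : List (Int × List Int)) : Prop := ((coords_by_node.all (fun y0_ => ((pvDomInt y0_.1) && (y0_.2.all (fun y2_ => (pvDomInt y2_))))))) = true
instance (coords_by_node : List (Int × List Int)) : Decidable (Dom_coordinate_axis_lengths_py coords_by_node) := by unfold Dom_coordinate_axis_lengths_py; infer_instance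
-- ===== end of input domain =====

-- B replaces A's D independent rescans of all values (one set comprehension per axis)
-- by a single forward pass that distributes each coordinate into D accumulator sets (objective: alternative).

-- ===== PORT A =====
def coordinate_axis_lengths_py (coords_by_node : List (Int × List Int)) : List Int :=
  match coords_by_node with
  | [] => []
  | (_, v0) :: _ =>
    -- dimensions = len(next(iter(coords_by_node.values())))
    let vals := coords_by_node.map Prod.snd
    (PySem.List.pyRange 0 (v0.length : Int) 1).map (fun axis_index =>
      ((PySem.Set.ofList (vals.map (fun coords => PySem.List.pyGetD coords axis_index 0))).length : Int))

-- ===== PORT B =====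
-- one step of B's single pass: lazily create the D accumulator sets from the first
-- tuple, then distribute coords[i] into set i for every axis i
def pvStepB (acc : Option (List (PySem.Set Int))) (coords : List Int) : Option (List (PySem.Set Int)) :=
  let sets := match acc with
    | none => List.replicate coords.length PySem.Set.empty
    | some s => s
  some (sets.mapIdx (fun i s => PySem.Set.add s (PySem.List.pyGetD coords (i : Int) 0)))

def coordinate_axis_lengths_py_alt (coords_by_node : List (Int × List Int)) : List Int :=
  match (coords_by_node.map Prod.snd).foldl pvStepB none with
  | none => []
  | some sets => sets.map (fun s => (PySem.Set.len s : Int))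

-- ===== PRECONDITION & SPEC =====
-- Pre_ excludes assoc lists with duplicate keys (the Lean encoding of a dict is only
-- well-formed with distinct keys; Python's dict collapses duplicates before A runs) and
-- ragged inputs where some tuple is shorter than the first one, on which A raises IndexError.
def Pre_coordinate_axis_lengths_py (coords_by_node : List (Int × List Int)) : Prop :=
  (coords_by_node.map Prod.fst).Nodup ∧
  ∀ p ∈ coords_by_node, ((coords_by_node.headD (0, [])).2).length ≤ p.2.length
instance (coords_by_node : List (Int × List Int)) : Decidable (Pre_coordinate_axis_lengths_py coords_by_node) := by unfold Pre_coordinate_axis_lengths_py; infer_instance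

def pvWitness_coordinate_axis_lengths_py : (List (Int × List Int)) := [(1, [4, 5]), (2, [4, 7])]

def Spec_coordinate_axis_lengths_py (coords_by_node : List (Int × List Int)) (out : List Int) : Prop := out = coordinate_axis_lengths_py_alt coords_by_node
instance (coords_by_node : List (Int × List Int)) (out : List Int) : Decidable (Spec_coordinate_axis_lengths_py coords_by_node out) := by unfold Spec_coordinate_axis_lengths_py; infer_instance

-- ===== CLAIM (what is proved, stated in full; the proofs are below) =====
def Claim_equal_coordinate_axis_lengths_py : Prop := ∀ (coords_by_node : List (Int × List Int)), Dom_coordinate_axis_lengths_py coords_by_node → Pre_coordinate_axis_lengths_py coords_by_node → Spec_coordinate_axis_lengths_py coords_by_node (coordinate_axis_lengths_py coords_by_node)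

-- ===== LEMMAS AND PROOFS =====

-- B's single pass, folded over all values, leaves set i equal to set i of init updated
-- with column i of the values.
theorem foldl_distribute (vals : List (List Int)) (init : List (PySem.Set Int)) :
    vals.foldl
      (fun (acc : List (PySem.Set Int)) coords =>
        acc.mapIdx (fun i s => PySem.Set.add s (PySem.List.pyGetD coords (i : Int) 0)))
      init
    = init.mapIdx (fun i s =>
        PySem.Set.update s (vals.map (fun coords => PySem.List.pyGetD coords (i : Int) 0))) := by
  induction vals generalizing init with
  | nil =>
    simp only [List.foldl_nil, List.map_nil]
    have : ∀ (l : List (PySem.Set Int)), l.mapIdx (fun _ s => PySem.Set.update s []) = l := by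
      intro l; apply List.ext_getElem <;> simp [PySem.Set.update]
    exact (this init).symm
  | cons v vs ih =>
    simp only [List.foldl_cons, List.map_cons]
    rw [ih, List.mapIdx_mapIdx]
    rfl

theorem foldl_some (vs : List (List Int)) (s : List (PySem.Set Int)) :
    vs.foldl pvStepB (some s)
    = some (vs.foldl
        (fun (acc : List (PySem.Set Int)) coords =>
          acc.mapIdx (fun i t => PySem.Set.add t (PySem.List.pyGetD coords (i : Int) 0)))
        s) := by
  induction vs generalizing s with
  | nil => rfl
  | cons v vs ih => simp [List.foldl_cons, pvStepB, ih]

theorem coordinate_axis_lengths_eq (coords_by_node : List (Int × List Int)) :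
    coordinate_axis_lengths_py coords_by_node = coordinate_axis_lengths_py_alt coords_by_node := by
  match coords_by_node with
  | [] => rfl
  | (k, v0) :: rest =>
    simp only [coordinate_axis_lengths_py, coordinate_axis_lengths_py_alt,
      List.map_cons, List.foldl_cons]
    rw [show pvStepB none v0
          = some ((List.replicate v0.length PySem.Set.empty).mapIdx
              (fun i s => PySem.Set.add s (PySem.List.pyGetD v0 (i : Int) 0))) from rfl,
      foldl_some, foldl_distribute, List.mapIdx_mapIdx]
    apply List.ext_getElem
    · simp [PySem.List.pyRange_one]
    · intro i h1 h2
      simp [PySem.List.pyRange_one, PySem.Set.len, PySem.Set.empty, PySem.Set.update,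
            PySem.Set.ofList_eq_foldl, PySem.Set.add, PySem.Set.contains]

-- ===== VERDICT (by name: the statement is the Claim_ definition above) =====
theorem coordinate_axis_lengths_py_spec : Claim_equal_coordinate_axis_lengths_py := by
  intro c _ _
  unfold Spec_coordinate_axis_lengths_py
  exact coordinate_axis_lengths_eq c
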